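-- pv_equiv track=rewrite | github.com/Julynx/exception-control | src/string_utils.py | to_dict_inverted
-- ===== SOURCE A (Python) =====
-- def to_dict_inverted(list_of_tuples):
--
--     dictionary = {}
--
--     for key, value in list_of_tuples:
--
--         if value in dictionary:
--             dictionary[value] += ", " + key
--             continue
--
--         dictionary[value] = key
--
--     return dictionary
-- ===== SOURCE B (Python) =====
-- def to_dict_inverted(list_of_tuples):
--     # Pass 1: group keys by value, preserving first-seen value order.
--     groups = {}
--     for key, value in list_of_tuples:
--         groups.setdefault(value, []).append(key)
--     # Pass 2: reduce each group to a single string.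
--     return {value: keys[0] if len(keys) == 1 else ", ".join(keys)
--             for value, keys in groups.items()}
-- ===== Notes on version B (the rewrite author's own statement) =====
-- stated objective: alternative
-- what changed: Replaces the fused append-or-set dict loop by two passes: a grouping pass collecting each value's keys into a list via setdefault, then a comprehension that reduces each group to keys[0] or ', '.join(keys).
import Mathlib
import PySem

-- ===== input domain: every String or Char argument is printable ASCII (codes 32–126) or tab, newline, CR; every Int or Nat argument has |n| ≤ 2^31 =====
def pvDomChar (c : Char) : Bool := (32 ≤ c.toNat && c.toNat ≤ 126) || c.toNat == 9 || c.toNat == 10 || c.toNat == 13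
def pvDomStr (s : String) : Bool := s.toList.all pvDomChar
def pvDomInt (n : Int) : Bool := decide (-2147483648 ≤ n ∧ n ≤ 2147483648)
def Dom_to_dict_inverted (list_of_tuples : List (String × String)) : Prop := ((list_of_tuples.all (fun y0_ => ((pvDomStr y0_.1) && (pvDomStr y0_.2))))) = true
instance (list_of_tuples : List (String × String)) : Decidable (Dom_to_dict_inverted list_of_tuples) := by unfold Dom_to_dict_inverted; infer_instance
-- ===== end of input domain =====

-- B replaces A's fused append-or-set dict loop by two passes (group keys per value, then reduce each
-- group to keys[0] or ", ".join(keys)); alternative decomposition, same cost, same return value.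


-- ===== PORT A =====
-- literal transliteration of A: one dict, append-or-set per tuple
def to_dict_inverted (list_of_tuples : List (String × String)) : List (String × String) :=
  (list_of_tuples.foldl
    (fun dictionary p =>
      if dictionary.contains p.2 then
        dictionary.insert p.2 (dictionary.getD p.2 "" ++ ", " ++ p.1)   -- dictionary[value] += ", " + key (value present)
      else
        dictionary.insert p.2 p.1)                                      -- dictionary[value] = key
    PySem.Dict.empty).items

-- ===== PORT B =====
-- transliteration of Source B: grouping pass (setdefault(value, []).append(key) = modify value [] (· ++ [key])),
-- then a comprehension reducing each group; keys[0] ported as headD "" (groups' lists are nonempty by construction)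
def to_dict_inverted_alt (list_of_tuples : List (String × String)) : List (String × String) :=
  let groups := list_of_tuples.foldl
    (fun d p => d.modify p.2 [] (fun ks => ks ++ [p.1])) PySem.Dict.empty
  groups.items.map (fun p =>
    (p.1, if p.2.length == 1 then p.2.headD "" else PySem.Str.join ", " p.2))

-- ===== PRECONDITION & SPEC =====
def Spec_to_dict_inverted (list_of_tuples : List (String × String)) (out : List (String × String)) : Prop := out = to_dict_inverted_alt list_of_tuples
instance (list_of_tuples : List (String × String)) (out : List (String × String)) : Decidable (Spec_to_dict_inverted list_of_tuples out) := by unfold Spec_to_dict_inverted; infer_instance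

-- ===== CLAIM (what is proved, stated in full; the proofs are below) =====
def Claim_equal_to_dict_inverted : Prop := ∀ (list_of_tuples : List (String × String)), Dom_to_dict_inverted list_of_tuples → Spec_to_dict_inverted list_of_tuples (to_dict_inverted list_of_tuples)

-- ===== LEMMAS AND PROOFS =====

-- the value A keeps for a group: ", ".join of the group's key list
def pvJoin (ks : List String) : String := PySem.Str.join ", " ks

def pvF (p : String × List String) : String × String := (p.1, pvJoin p.2)

theorem pvJoin_singleton (k : String) : pvJoin [k] = k := by
  simp [pvJoin, PySem.Str.join, PySem.Chars.join, List.intercalate]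

theorem intercalate_append_singleton (sep x : List Char) (xs : List (List Char)) (h : xs ≠ []) :
    List.intercalate sep (xs ++ [x]) = List.intercalate sep xs ++ sep ++ x := by
  induction xs with
  | nil => simp at h
  | cons a t ih =>
    cases t with
    | nil => simp [List.intercalate, List.intersperse]
    | cons b u =>
      have h2 := ih (by simp)
      calc List.intercalate sep ((a :: b :: u) ++ [x])
          = a ++ sep ++ List.intercalate sep ((b :: u) ++ [x]) := by
            simp [List.intercalate, List.intersperse]
        _ = a ++ sep ++ (List.intercalate sep (b :: u) ++ sep ++ x) := by rw [h2]
        _ = List.intercalate sep (a :: b :: u) ++ sep ++ x := by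
            simp [List.intercalate, List.intersperse]

theorem pvJoin_append_singleton (ks : List String) (k : String) (h : ks ≠ []) :
    pvJoin (ks ++ [k]) = pvJoin ks ++ ", " ++ k := by
  have hm : List.map String.toList ks ≠ [] := by simp [h]
  simp only [pvJoin, PySem.Str.join, PySem.Chars.join, List.map_append, List.map_cons, List.map_nil]
  rw [intercalate_append_singleton _ _ _ hm]
  rw [String.ofList_append, String.ofList_append]
  simp

-- the loop invariant: A's dict is B's group dict with every group joined
theorem pv_inv (l : List (String × String)) :
    ∀ (dA : PySem.Dict String String) (dB : PySem.Dict String (List String)),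
    dA.items = dB.items.map pvF → (∀ p ∈ dB.items, p.2 ≠ []) → dB.keys.Nodup →
    (l.foldl (fun dictionary p =>
        if dictionary.contains p.2 then
          dictionary.insert p.2 (dictionary.getD p.2 "" ++ ", " ++ p.1)
        else dictionary.insert p.2 p.1) dA).items
      = ((l.foldl (fun d p => d.modify p.2 [] (fun ks => ks ++ [p.1])) dB).items).map pvF
    ∧ (∀ p ∈ (l.foldl (fun d p => d.modify p.2 [] (fun ks => ks ++ [p.1])) dB).items, p.2 ≠ [])
    ∧ (l.foldl (fun d p => d.modify p.2 [] (fun ks => ks ++ [p.1])) dB).keys.Nodup := by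
  induction l with
  | nil => intro dA dB h hne hnd; exact ⟨h, hne, hnd⟩
  | cons q t ih =>
    intro dA dB h hne hnd
    obtain ⟨k, v⟩ := q
    have hkeys : dA.keys = dB.keys := by
      simp only [PySem.Dict.keys, h, List.map_map]; rfl
    have hndA : dA.keys.Nodup := hkeys ▸ hnd
    have hcont : dA.contains v = dB.contains v := by
      rw [PySem.Dict.contains_eq_decide_mem_keys dA v, PySem.Dict.contains_eq_decide_mem_keys dB v, hkeys]
    simp only [List.foldl_cons, PySem.Dict.modify]
    by_cases hc : dB.contains v = true
    · -- value already grouped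
      obtain ⟨ks, hks⟩ : ∃ ks, dB.get? v = some ks := by
        have := PySem.Dict.contains_eq_isSome_get? dB v
        rw [hc] at this
        exact Option.isSome_iff_exists.mp this.symm
      have hmemB : (v, ks) ∈ dB.items := PySem.Dict.mem_items_of_get?_eq_some dB hks
      have hksne : ks ≠ [] := hne _ hmemB
      have hgetB : dB.getD v [] = ks := PySem.Dict.getD_of_mem_items dB hmemB hnd []
      have hmemA : (v, pvJoin ks) ∈ dA.items := by
        rw [h]; exact List.mem_map_of_mem hmemB
      have hgetA : dA.getD v "" = pvJoin ks := PySem.Dict.getD_of_mem_items dA hmemA hndA ""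
      rw [if_pos (hcont.trans hc)]
      apply ih
      · rw [PySem.Dict.items_insert_of_contains dA _ (hcont ▸ hc),
            PySem.Dict.items_insert_of_contains dB _ hc, h, List.map_map, List.map_map]
        apply List.map_congr_left
        intro p _
        by_cases hp : p.1 = v
        · simp [Function.comp, pvF, hp, hgetA, hgetB,
                pvJoin_append_singleton ks k hksne]
        · simp [Function.comp, pvF, hp]
      · intro p hp
        rcases (PySem.Dict.mem_items_insert _ _ _ _).mp hp with hp1 | hp2
        · subst hp1; simp
        · exact hne _ hp2.1
      · exact PySem.Dict.nodup_keys_insert _ _ _ hnd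
    · -- fresh value
      have hcf : dB.contains v = false := by simpa using hc
      have hgetB : dB.getD v [] = [] := PySem.Dict.getD_of_not_contains dB [] hcf
      rw [if_neg (by rw [hcont, hcf]; simp)]
      apply ih
      · rw [PySem.Dict.items_insert_of_not_contains dA _ (hcont ▸ hcf),
            PySem.Dict.items_insert_of_not_contains dB _ hcf, h, List.map_append, hgetB]
        simp [pvF, pvJoin_singleton]
      · intro p hp
        rcases (PySem.Dict.mem_items_insert _ _ _ _).mp hp with hp1 | hp2
        · subst hp1; simp
        · exact hne _ hp2.1
      · exact PySem.Dict.nodup_keys_insert _ _ _ hnd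

-- ===== VERDICT (by name: the statement is the Claim_ definition above) =====
theorem to_dict_inverted_spec : Claim_equal_to_dict_inverted := by
  intro l _
  unfold Spec_to_dict_inverted to_dict_inverted to_dict_inverted_alt
  obtain ⟨hitems, hne, -⟩ := pv_inv l PySem.Dict.empty PySem.Dict.empty (by rfl)
    (by intro p hp; simp [PySem.Dict.empty] at hp) (by simp [PySem.Dict.keys, PySem.Dict.empty])
  rw [hitems]
  apply List.map_congr_left
  intro p hp
  by_cases h1 : p.2.length = 1
  · obtain ⟨a, ha⟩ := List.length_eq_one_iff.mp h1
    simp [pvF, ha, pvJoin_singleton]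
  · simp [pvF, pvJoin, h1]
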